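-- pv_equiv track=rewrite | github.com/JaySean/minesweeper_solver | generator.py | generate_minefield
-- ===== SOURCE A (Python) =====
-- def generate_minefield(m, n, mines):
--     minefield = [[0 for _ in range(n)] for _ in range(m)]
--     range_r, range_c = range(0, m), range(0, n)
--
--     for mine in mines:
--         r, c = mine // n, mine % n
--         for dr in range(-1, 2):
--             for dc in range(-1, 2):
--                 new_r, new_c = r + dr, c + dc
--                 if new_r in range_r and new_c in range_c:
--                     minefield[new_r][new_c] += 1
--     return minefield
-- ===== SOURCE B (Python) =====
-- def generate_minefield(m, n, mines):
--     near = {}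
--     for mine in mines:
--         r, c = mine // n, mine % n
--         for dr in (-1, 0, 1):
--             for dc in (-1, 0, 1):
--                 key = (r + dr, c + dc)
--                 near[key] = near.get(key, 0) + 1
--     minefield = [[0] * n for _ in range(m)]
--     for (r, c), k in near.items():
--         if 0 <= r < m and 0 <= c < n:
--             minefield[r][c] = k
--     return minefield
-- ===== Notes on version B (the rewrite author's own statement) =====
-- stated objective: alternative
-- what changed: Replaces A's in-place scatter into the nested-list grid (a bounds check before each of the nine neighbour increments) by a counter dict over unclipped (row, col) tuple keys, after which each in-range key's count is written once into a fresh zero grid.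
import Mathlib
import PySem

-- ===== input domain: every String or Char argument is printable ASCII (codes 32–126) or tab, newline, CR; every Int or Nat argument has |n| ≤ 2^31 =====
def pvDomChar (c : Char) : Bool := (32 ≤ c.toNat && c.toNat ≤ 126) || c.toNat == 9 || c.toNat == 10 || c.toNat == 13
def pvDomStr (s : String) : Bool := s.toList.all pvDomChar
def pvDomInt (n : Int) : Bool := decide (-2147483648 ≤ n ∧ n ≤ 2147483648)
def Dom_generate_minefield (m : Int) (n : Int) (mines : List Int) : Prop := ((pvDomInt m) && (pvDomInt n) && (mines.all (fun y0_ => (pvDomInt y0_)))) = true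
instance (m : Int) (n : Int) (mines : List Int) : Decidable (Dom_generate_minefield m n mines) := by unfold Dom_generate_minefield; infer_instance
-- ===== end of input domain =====

-- B replaces A's in-place scatter into the nested-list grid (a bounds check before every
-- neighbour increment) by a counter dict over unclipped (row, col) keys, then writes each
-- in-range key's count into a fresh zero grid (objective: alternative).

-- ===== PORT A =====
-- 'new_r in range(0, m)' is exactly 0 ≤ new_r < m (step-1 range membership);
-- the guarded indices are then in range, so .toNat and List.modify are exact.
def generate_minefield (m : Int) (n : Int) (mines : List Int) : List (List Int) :=
  let minefield := (PySem.List.pyRange 0 m 1).map (fun _ => (PySem.List.pyRange 0 n 1).map (fun _ => (0 : Int)))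
  mines.foldl (fun minefield mine =>
    let r := PySem.Int.floordiv mine n
    let c := PySem.Int.mod mine n
    (PySem.List.pyRange (-1) 2 1).foldl (fun minefield dr =>
      (PySem.List.pyRange (-1) 2 1).foldl (fun minefield dc =>
        let new_r := r + dr
        let new_c := c + dc
        if 0 ≤ new_r ∧ new_r < m ∧ 0 ≤ new_c ∧ new_c < n then
          minefield.modify new_r.toNat (fun row => row.modify new_c.toNat (· + 1))
        else minefield) minefield) minefield) minefield

-- ===== PORT B =====
-- '[0] * n' is List.replicate n.toNat 0 (empty for n < 0, exactly Python); the guarded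
-- 'minefield[r][c] = k' is List.modify/List.set on indices the guard keeps in range.
def generate_minefield_alt (m : Int) (n : Int) (mines : List Int) : List (List Int) :=
  let near := mines.foldl (fun near mine =>
    let r := PySem.Int.floordiv mine n
    let c := PySem.Int.mod mine n
    [(-1 : Int), 0, 1].foldl (fun near dr =>
      [(-1 : Int), 0, 1].foldl (fun near dc =>
        let key := (r + dr, c + dc)
        near.insert key (near.getD key 0 + 1)) near) near) (PySem.Dict.empty)
  let minefield := (PySem.List.pyRange 0 m 1).map (fun _ => List.replicate n.toNat (0 : Int))
  near.items.foldl (fun minefield kv =>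
    if 0 ≤ kv.1.1 ∧ kv.1.1 < m ∧ 0 ≤ kv.1.2 ∧ kv.1.2 < n then
      minefield.modify kv.1.1.toNat (fun row => row.set kv.1.2.toNat kv.2)
    else minefield) minefield

-- ===== PRECONDITION & SPEC =====
-- Python A raises ZeroDivisionError on 'mine // n' iff n = 0 and some mine is read (B raises identically there).
def Pre_generate_minefield (m : Int) (n : Int) (mines : List Int) : Prop := n ≠ 0 ∨ mines = []
instance (m : Int) (n : Int) (mines : List Int) : Decidable (Pre_generate_minefield m n mines) := by unfold Pre_generate_minefield; infer_instance
def pvWitness_generate_minefield : Int × Int × List Int := (2, 3, [0, 4])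

def Spec_generate_minefield (m : Int) (n : Int) (mines : List Int) (out : List (List Int)) : Prop := out = generate_minefield_alt m n mines
instance (m : Int) (n : Int) (mines : List Int) (out : List (List Int)) : Decidable (Spec_generate_minefield m n mines out) := by unfold Spec_generate_minefield; infer_instance

-- ===== CLAIM (what is proved, stated in full; the proofs are below) =====
def Claim_equal_generate_minefield : Prop := ∀ (m : Int) (n : Int) (mines : List Int), Dom_generate_minefield m n mines → Pre_generate_minefield m n mines → Spec_generate_minefield m n mines (generate_minefield m n mines)

-- ===== LEMMAS AND PROOFS =====

-- the (row, col) key of a mine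
def pvKey (n : Int) (mine : Int) : Int × Int := (PySem.Int.floordiv mine n, PySem.Int.mod mine n)

-- an m×n grid whose (r, c) entry is f r c
def pvMkGrid (m n : Int) (f : Int → Int → Int) : List (List Int) :=
  (PySem.List.pyRange 0 m 1).map (fun r => (PySem.List.pyRange 0 n 1).map (fun c => f r c))

-- A's scatter step for one mine key
def pvStep (m n : Int) (g : List (List Int)) (k : Int × Int) : List (List Int) :=
  (PySem.List.pyRange (-1) 2 1).foldl (fun minefield dr =>
    (PySem.List.pyRange (-1) 2 1).foldl (fun minefield dc =>
      let new_r := k.1 + dr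
      let new_c := k.2 + dc
      if 0 ≤ new_r ∧ new_r < m ∧ 0 ≤ new_c ∧ new_c < n then
        minefield.modify new_r.toNat (fun row => row.modify new_c.toNat (· + 1))
      else minefield) minefield) g

-- the nine unclipped neighbour keys of a mine key
def pvNine (k : Int × Int) : List (Int × Int) :=
  [(-1 : Int), 0, 1].flatMap (fun dr => [(-1 : Int), 0, 1].map (fun dc => (k.1 + dr, k.2 + dc)))

-- B's cell value, in terms of the list of keys
def pvCell (keys : List (Int × Int)) (r c : Int) : Int :=
  ((keys.flatMap pvNine).count (r, c) : Int)

theorem pvMkGrid_congr {m n : Int} {f g : Int → Int → Int}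
    (h : ∀ r c, 0 ≤ r → r < m → 0 ≤ c → c < n → f r c = g r c) :
    pvMkGrid m n f = pvMkGrid m n g := by
  unfold pvMkGrid
  apply List.map_congr_left
  intro r hr
  rw [PySem.List.mem_pyRange_one] at hr
  apply List.map_congr_left
  intro c hc
  rw [PySem.List.mem_pyRange_one] at hc
  exact h r c hr.1 hr.2 hc.1 hc.2

theorem pv_if_bump (m n R C : Int) (f : Int → Int → Int) :
    (if 0 ≤ R ∧ R < m ∧ 0 ≤ C ∧ C < n then
        (pvMkGrid m n f).modify R.toNat (fun row => row.modify C.toNat (· + 1))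
      else pvMkGrid m n f)
    = pvMkGrid m n (fun r c => f r c + if r = R ∧ c = C then 1 else 0) := by
  split_ifs with h
  · obtain ⟨h1, h2, h3, h4⟩ := h
    apply List.ext_getElem
    · simp [pvMkGrid]
    · intro i hi1 hi2
      rw [List.getElem_modify]
      simp only [pvMkGrid, List.getElem_map, PySem.List.getElem_pyRange_one, zero_add] at *
      by_cases hiR : R.toNat = i
      · rw [if_pos hiR]
        apply List.ext_getElem
        · simp
        · intro j hj1 hj2
          rw [List.getElem_modify]
          simp only [List.getElem_map, PySem.List.getElem_pyRange_one, zero_add] at *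
          by_cases hjC : C.toNat = j
          · rw [if_pos hjC, if_pos (by omega : (i : Int) = R ∧ (j : Int) = C)]
          · rw [if_neg hjC, if_neg (by omega : ¬((i : Int) = R ∧ (j : Int) = C))]
            omega
      · rw [if_neg hiR]
        apply List.ext_getElem
        · simp
        · intro j hj1 hj2
          simp only [List.getElem_map, PySem.List.getElem_pyRange_one, zero_add] at *
          rw [if_neg (by omega : ¬((i : Int) = R ∧ (j : Int) = C))]
          omega
  · apply pvMkGrid_congr
    intro r c hr1 hr2 hc1 hc2
    rw [if_neg (by rintro ⟨rfl, rfl⟩; exact h ⟨hr1, hr2, hc1, hc2⟩)]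
    omega

theorem pv_if_set (m n R C K : Int) (f : Int → Int → Int) :
    (if 0 ≤ R ∧ R < m ∧ 0 ≤ C ∧ C < n then
        (pvMkGrid m n f).modify R.toNat (fun row => row.set C.toNat K)
      else pvMkGrid m n f)
    = pvMkGrid m n (fun r c => if r = R ∧ c = C then K else f r c) := by
  split_ifs with h
  · obtain ⟨h1, h2, h3, h4⟩ := h
    apply List.ext_getElem
    · simp [pvMkGrid]
    · intro i hi1 hi2
      rw [List.getElem_modify]
      simp only [pvMkGrid, List.getElem_map, PySem.List.getElem_pyRange_one, zero_add] at *
      by_cases hiR : R.toNat = i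
      · rw [if_pos hiR]
        apply List.ext_getElem
        · simp
        · intro j hj1 hj2
          rw [List.getElem_set]
          simp only [List.getElem_map, PySem.List.getElem_pyRange_one, zero_add] at *
          by_cases hjC : C.toNat = j
          · rw [if_pos hjC, if_pos (by omega : (i : Int) = R ∧ (j : Int) = C)]
          · rw [if_neg hjC, if_neg (by omega : ¬((i : Int) = R ∧ (j : Int) = C))]
      · rw [if_neg hiR]
        apply List.ext_getElem
        · simp
        · intro j hj1 hj2
          simp only [List.getElem_map, PySem.List.getElem_pyRange_one, zero_add] at *
          rw [if_neg (by omega : ¬((i : Int) = R ∧ (j : Int) = C))]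
  · apply pvMkGrid_congr
    intro r c hr1 hr2 hc1 hc2
    rw [if_neg (by rintro ⟨rfl, rfl⟩; exact h ⟨hr1, hr2, hc1, hc2⟩)]

theorem pv_fold_write (m n : Int) (v : Int × Int → Int) (S : List (Int × Int)) :
    ∀ (f : Int → Int → Int),
    S.foldl (fun g p =>
        if 0 ≤ p.1 ∧ p.1 < m ∧ 0 ≤ p.2 ∧ p.2 < n then
          g.modify p.1.toNat (fun row => row.set p.2.toNat (v p))
        else g) (pvMkGrid m n f)
    = pvMkGrid m n (fun r c => if (r, c) ∈ S then v (r, c) else f r c) := by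
  induction S using List.reverseRecOn with
  | nil =>
    intro f
    simp only [List.foldl_nil]
    apply pvMkGrid_congr
    intro r c _ _ _ _
    simp
  | append_singleton S p ih =>
    intro f
    rw [List.foldl_append, List.foldl_cons, List.foldl_nil, ih f, pv_if_set]
    apply pvMkGrid_congr
    intro r c _ _ _ _
    by_cases hp : r = p.1 ∧ c = p.2
    · obtain ⟨rfl, rfl⟩ := hp
      simp
    · rw [if_neg hp]
      have : ((r, c) ∈ S ++ [p]) ↔ (r, c) ∈ S := by
        simp only [List.mem_append, List.mem_singleton]
        constructor
        · rintro (h | h)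
          · exact h
          · exact absurd ⟨congrArg Prod.fst h, congrArg Prod.snd h⟩ hp
        · exact Or.inl
      simp only [this]

theorem pvStep_mkGrid (m n : Int) (f : Int → Int → Int) (k : Int × Int) :
    pvStep m n (pvMkGrid m n f) k
    = pvMkGrid m n (fun r c => f r c +
        ([(-1 : Int), 0, 1].flatMap (fun dr => [(-1 : Int), 0, 1].map (fun dc =>
          if r = k.1 + dr ∧ c = k.2 + dc then (1 : Int) else 0))).sum) := by
  unfold pvStep
  rw [show PySem.List.pyRange (-1) 2 1 = [(-1 : Int), 0, 1] from by decide]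
  simp only [List.foldl_cons, List.foldl_nil]
  simp only [pv_if_bump]
  apply pvMkGrid_congr
  intro r c _ _ _ _
  simp only [List.flatMap_cons, List.map_cons, List.map_nil, List.flatMap_nil,
    List.append_nil, List.sum_append, List.sum_cons, List.sum_nil]
  omega

set_option maxHeartbeats 1600000 in
theorem pvFold_eq (m n : Int) (keys : List (Int × Int)) :
    keys.foldl (pvStep m n) (pvMkGrid m n (fun _ _ => 0))
    = pvMkGrid m n (fun r c => pvCell keys r c) := by
  induction keys using List.reverseRecOn with
  | nil =>
    simp only [List.foldl_nil]
    apply pvMkGrid_congr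
    intro r c _ _ _ _
    simp [pvCell]
  | append_singleton keys k ih =>
    obtain ⟨kr, kc⟩ := k
    rw [List.foldl_append, List.foldl_cons, List.foldl_nil, ih, pvStep_mkGrid]
    apply pvMkGrid_congr
    intro r c _ _ _ _
    simp only [pvCell, pvNine, List.flatMap_append, List.count_append, List.flatMap_cons,
      List.map_cons, List.map_nil, List.flatMap_nil, List.append_nil, List.sum_append,
      List.sum_cons, List.sum_nil, List.count_cons, List.count_nil, beq_iff_eq, Prod.mk.injEq]
    push_cast
    norm_num
    simp only [eq_comm]
    ring

theorem pvA_eq (m n : Int) (mines : List Int) :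
    generate_minefield m n mines
    = (mines.map (pvKey n)).foldl (pvStep m n) (pvMkGrid m n (fun _ _ => 0)) := by
  rw [List.foldl_map]
  rfl

set_option maxHeartbeats 4000000 in
theorem pvB_eq (m n : Int) (mines : List Int) :
    generate_minefield_alt m n mines = pvMkGrid m n (fun r c => pvCell (mines.map (pvKey n)) r c) := by
  unfold generate_minefield_alt
  have hc : (mines.foldl (fun near mine =>
      let r := PySem.Int.floordiv mine n
      let c := PySem.Int.mod mine n
      [(-1 : Int), 0, 1].foldl (fun near dr =>
        [(-1 : Int), 0, 1].foldl (fun near dc =>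
          let key := (r + dr, c + dc)
          near.insert key (near.getD key 0 + 1)) near) near) (PySem.Dict.empty))
      = PySem.Dict.counter ((mines.map (pvKey n)).flatMap pvNine) := by
    rw [← PySem.Dict.foldl_insert_getD_add_one_eq_counter, List.foldl_flatMap, List.foldl_map]
    congr 1
  rw [hc]
  have hinit : ((PySem.List.pyRange 0 m 1).map (fun _ => List.replicate n.toNat (0 : Int)))
      = pvMkGrid m n (fun _ _ => 0) := by
    unfold pvMkGrid
    apply List.map_congr_left
    intro r _
    rw [List.map_const', PySem.List.length_pyRange_one]
    norm_num
  simp only [PySem.Dict.items_counter, List.foldl_map, hinit]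
  rw [pv_fold_write m n (fun p => ((((mines.map (pvKey n)).flatMap pvNine).count p : Int)))
      (PySem.Set.ofList ((mines.map (pvKey n)).flatMap pvNine)) (fun _ _ => 0)]
  apply pvMkGrid_congr
  intro r c _ _ _ _
  by_cases hmem : (r, c) ∈ (mines.map (pvKey n)).flatMap pvNine
  · rw [if_pos (by rw [PySem.Set.mem_ofList]; exact hmem)]
    rfl
  · rw [if_neg (by rw [PySem.Set.mem_ofList]; exact hmem)]
    simp only [pvCell, List.count_eq_zero.mpr hmem, Int.natCast_zero]

-- ===== VERDICT (by name: the statement is the Claim_ definition above) =====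
theorem generate_minefield_spec : Claim_equal_generate_minefield := by
  intro m n mines _ _
  unfold Spec_generate_minefield
  rw [pvA_eq, pvB_eq, pvFold_eq]
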